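-- pv_equiv track=rewrite | github.com/XiakeHu/Test-Generation-for-Binaries-Without-Source-Code | code_handle.py | split_var
-- ===== SOURCE A (Python) =====
-- def extract_function(c_code, function_name):
--     c_code_list = c_code.split("\n")
--     # 1. 定位函数定义行（排除注释）
--     func_def_start_line = -1
--     for k in range(len(c_code_list)):
--         line = c_code_list[k].strip()
--         if line.startswith("//") or ("/*" in line and "*/" in line):
--             continue  # 跳过注释行
--         if f"{function_name}(" in line and ";" not in line:
--             func_def_start_line = k
--             break
--     if func_def_start_line == -1:
--         return None
--     c_code = "\n".join(c_code_list[func_def_start_line:])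
--
--     # 2. 定位函数名起始位置
--     func_start_index = c_code.find(f"{function_name}(")
--     if func_start_index == -1:
--         return None
--
--     # 3. 定位返回类型起始位置
--     type_start_index = func_start_index
--     while type_start_index > 0 and c_code[type_start_index - 1] != "\n":
--         type_start_index -= 1
--
--     # 4. 匹配大括号（核心优化：排除字符串内的括号）
--     brace_count = 0
--     end_brace_index = -1  # 初始化，避免未赋值
--     in_quote = None  # 标记是否在字符串内（None/'\''/'"'）
--     len_c = len(c_code)
--
--     for i in range(type_start_index, len_c):
--         # 处理字符串引号（单引号或双引号）
--         current_char = c_code[i]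
--         if current_char in ["'", '"']:
--             if in_quote == current_char:
--                 in_quote = None  # 退出字符串
--             elif in_quote is None:
--                 in_quote = current_char  # 进入字符串
--
--         # 仅当不在字符串内时，才计数括号
--         if in_quote is None:
--             if current_char == "{":
--                 brace_count += 1
--             elif current_char == "}":
--                 brace_count -= 1
--                 if brace_count == 0:
--                     end_brace_index = i
--                     break
--
--     # 5. 处理未找到结束括号的情况
--     if end_brace_index == -1:
--         return None  # 避免引用未赋值的变量
--
--     return c_code[type_start_index:end_brace_index + 1]
--
-- def split_var(codes, func_name):
--     string_codes = "\n".join(codes)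
--     func_codes = extract_function(string_codes + "\n```", func_name)
--     if func_codes:
--         for func_code in func_codes.split("\n"):
--             if not func_code or func_code not in codes:
--                 continue
--             codes.remove(func_code)
--         return codes, func_codes.split("\n")
--     else:
--         return codes, []
-- ===== SOURCE B (Python) =====
-- # B: find the def line once, extract the function body line-by-line with a single
-- # quote/brace scan over the lines themselves, then delete its lines from codes with
-- # a per-line removal budget (dict counter) and ONE filtering pass -- O(n+m) overall
-- # instead of A's rejoin/re-scan plus repeated `in`/`remove` passes over codes.
-- # Like A, split_var mutates `codes` in place (B assigns codes[:] = the kept lines).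
--
-- def _is_def_line(raw, target):
--     line = raw.strip()
--     if line.startswith("//") or ("/*" in line and "*/" in line):
--         return False
--     return target in line and ";" not in line
--
--
-- def _extract_func_lines(codes, func_name):
--     lines = ("\n".join(codes) + "\n```").split("\n")
--     target = func_name + "("
--     k = next((i for i, raw in enumerate(lines) if _is_def_line(raw, target)), -1)
--     if k == -1:
--         return None
--     quote = None
--     depth = 0
--     collected = []
--     for line in lines[k:]:
--         for p, ch in enumerate(line):
--             if ch == "'" or ch == '"':
--                 if quote == ch:
--                     quote = None
--                 elif quote is None:
--                     quote = ch
--             if quote is None: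
--                 if ch == "{":
--                     depth += 1
--                 elif ch == "}":
--                     depth -= 1
--                     if depth == 0:
--                         return collected + [line[:p + 1]]
--         collected.append(line)
--     return None
--
--
-- def split_var(codes, func_name):
--     func_lines = _extract_func_lines(codes, func_name)
--     if func_lines is None:
--         return codes, []
--     budget = {}
--     for line in func_lines:
--         if line:
--             budget[line] = budget.get(line, 0) + 1
--     kept = []
--     for c in codes:
--         if budget.get(c, 0) > 0:
--             budget[c] -= 1
--         else:
--             kept.append(c)
--     codes[:] = kept
--     return codes, func_lines
-- ===== Notes on version B (the rewrite author's own statement) =====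
-- stated objective: faster
-- what changed: B locates the def line with a single predicate search, extracts the function body by one quote/brace scan over the split lines (no re-join, no backtracking find), and removes the extracted lines from codes with a per-line dict removal budget and one filtering pass, instead of A's per-line `in codes` + `codes.remove` scans.
import Mathlib
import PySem

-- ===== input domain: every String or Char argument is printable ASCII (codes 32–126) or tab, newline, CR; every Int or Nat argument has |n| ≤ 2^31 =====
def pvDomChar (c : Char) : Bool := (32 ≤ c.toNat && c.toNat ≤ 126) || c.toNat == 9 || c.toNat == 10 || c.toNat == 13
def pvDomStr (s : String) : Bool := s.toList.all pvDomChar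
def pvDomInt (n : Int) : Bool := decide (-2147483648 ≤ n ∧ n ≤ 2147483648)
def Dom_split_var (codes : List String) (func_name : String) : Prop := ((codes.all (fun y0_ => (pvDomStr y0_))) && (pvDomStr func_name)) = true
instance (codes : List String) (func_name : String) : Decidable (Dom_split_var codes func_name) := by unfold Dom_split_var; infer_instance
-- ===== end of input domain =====

-- B re-implements split_var: one predicate search for the def line, one quote/brace scan
-- over the split lines, and a dict removal budget + one filtering pass over codes.
-- Python's split_var mutates `codes` in place (both A and B do); the theorems below are
-- about the RETURN value [remaining codes, extracted function lines].

-- ===== PORT A =====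

-- shared primitive wrapper: Python's  s.split("\n")  (the separator is non-empty)
def pyStrSplitNl (s : String) : List String := (PySem.Str.split? s "\n").getD []

-- step-1 loop of extract_function: first non-comment line containing f"{name}(" and no ";"
def pvA_findDefLine (function_name : String) : List String → Nat → Option Nat
  | [], _ => none
  | l :: rest, k =>
    let line := PySem.Str.strip l
    if PySem.Str.startswith line "//" || (PySem.Str.isIn "/*" line && PySem.Str.isIn "*/" line) then
      pvA_findDefLine function_name rest (k + 1)
    else if PySem.Str.isIn (function_name ++ "(") line && !PySem.Str.isIn ";" line then
      some k
    else
      pvA_findDefLine function_name rest (k + 1)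

-- step-3 while-loop: back up while the previous character is not a newline
def pvA_backtrack (c_code : String) : Nat → Nat
  | 0 => 0
  | i + 1 => if PySem.Str.pyGet? c_code (i : Int) ≠ some '\n' then pvA_backtrack c_code i else i + 1

-- step-4 for-loop over range(type_start_index, len_c); `break` returns the closing index
def pvA_braceScan (c_code : String) (lenC : Nat) (i : Nat) (brace_count : Int)
    (in_quote : Option Char) : Option Nat :=
  if _h : i < lenC then
    match PySem.Str.pyGet? c_code (i : Int) with
    | none => none   -- unreachable: i < len(c_code)
    | some current_char =>
      let in_quote' :=
        if current_char = '\'' ∨ current_char = '"' then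
          if in_quote = some current_char then none
          else if in_quote = none then some current_char
          else in_quote
        else in_quote
      if in_quote' = none then
        if current_char = '{' then pvA_braceScan c_code lenC (i + 1) (brace_count + 1) in_quote'
        else if current_char = '}' then
          if brace_count - 1 = 0 then some i
          else pvA_braceScan c_code lenC (i + 1) (brace_count - 1) in_quote'
        else pvA_braceScan c_code lenC (i + 1) brace_count in_quote'
      else pvA_braceScan c_code lenC (i + 1) brace_count in_quote'
  else none
termination_by lenC - i

def extract_function (c_code0 : String) (function_name : String) : Option String :=
  let c_code_list := pyStrSplitNl c_code0
  match pvA_findDefLine function_name c_code_list 0 with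
  | none => none
  | some func_def_start_line =>
    let c_code := PySem.Str.join "\n"
      (PySem.List.slice c_code_list (some (func_def_start_line : Int)) none)
    let func_start_index := PySem.Str.find c_code (function_name ++ "(")
    if func_start_index = -1 then none
    else
      let type_start_index := pvA_backtrack c_code func_start_index.toNat
      match pvA_braceScan c_code (PySem.Str.len c_code).toNat type_start_index 0 none with
      | none => none
      | some end_brace_index =>
        some (PySem.Str.slice c_code (some (type_start_index : Int))
          (some ((end_brace_index : Int) + 1)))

def split_var (codes : List String) (func_name : String) : List (List String) :=
  let string_codes := PySem.Str.join "\n" codes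
  match extract_function (string_codes ++ "\n```") func_name with
  | none => [codes, []]
  | some func_codes =>
    if func_codes = "" then [codes, []]   -- Python's `if func_codes:` truthiness
    else
      let fls := pyStrSplitNl func_codes
      let codes' := fls.foldl (fun cs func_code =>
        if func_code = "" ∨ func_code ∉ cs then cs
        else (PySem.List.remove? cs func_code).getD cs) codes
      [codes', fls]

-- ===== PORT B =====

def pvB_isDefLine (target raw : String) : Bool :=
  let line := PySem.Str.strip raw
  if PySem.Str.startswith line "//" || (PySem.Str.isIn "/*" line && PySem.Str.isIn "*/" line) then
    false
  else
    PySem.Str.isIn target line && !PySem.Str.isIn ";" line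

-- inner loop over one line's characters: left = state after the line, right = cut position
def pvB_scanLine : List Char → Option Char → Int → Nat → (Option Char × Int) ⊕ Nat
  | [], quote, depth, _ => Sum.inl (quote, depth)
  | ch :: rest, quote, depth, p =>
    let quote' :=
      if ch = '\'' ∨ ch = '"' then
        if quote = some ch then none else if quote = none then some ch else quote
      else quote
    if quote' = none then
      if ch = '{' then pvB_scanLine rest quote' (depth + 1) (p + 1)
      else if ch = '}' then
        if depth - 1 = 0 then Sum.inr p else pvB_scanLine rest quote' (depth - 1) (p + 1)
      else pvB_scanLine rest quote' depth (p + 1)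
    else pvB_scanLine rest quote' depth (p + 1)

-- outer loop over the remaining lines, collecting full lines until the cut line
def pvB_scanLines : List String → Option Char → Int → List String → Option (List String)
  | [], _, _, _ => none
  | line :: rest, quote, depth, collected =>
    match pvB_scanLine line.toList quote depth 0 with
    | Sum.inr p => some (collected ++ [PySem.Str.slice line none (some ((p : Int) + 1))])
    | Sum.inl (quote', depth') => pvB_scanLines rest quote' depth' (collected ++ [line])

def pvB_extract (codes : List String) (func_name : String) : Option (List String) :=
  let lines := pyStrSplitNl (PySem.Str.join "\n" codes ++ "\n```")
  match lines.findIdx? (pvB_isDefLine (func_name ++ "(")) with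
  | none => none
  | some k => pvB_scanLines (lines.drop k) none 0 []

def split_var_alt (codes : List String) (func_name : String) : List (List String) :=
  match pvB_extract codes func_name with
  | none => [codes, []]
  | some func_lines =>
    let budget := func_lines.foldl
      (fun d line => if line = "" then d else d.insert line (d.getD line 0 + 1))
      (PySem.Dict.empty : PySem.Dict String Int)
    let res := codes.foldl
      (fun (acc : List String × PySem.Dict String Int) c =>
        if acc.2.getD c 0 > 0 then (acc.1, acc.2.insert c (acc.2.getD c 0 - 1))
        else (acc.1 ++ [c], acc.2)) ([], budget)
    [res.1, func_lines]

-- ===== PRECONDITION & SPEC =====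
def Spec_split_var (codes : List String) (func_name : String) (out : List (List String)) : Prop := out = split_var_alt codes func_name
instance (codes : List String) (func_name : String) (out : List (List String)) : Decidable (Spec_split_var codes func_name out) := by unfold Spec_split_var; infer_instance

-- ===== CLAIM (what is proved, stated in full; the proofs are below) =====
def Claim_equal_split_var : Prop := ∀ (codes : List String) (func_name : String), Dom_split_var codes func_name → Spec_split_var codes func_name (split_var codes func_name)

-- ===== LEMMAS AND PROOFS =====

-- ===== proof-side definitions =====

-- structural model of  s.split("\n")  (pre = chars of the current piece)
def pvSplitNl : List Char → List Char → List (List Char)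
  | pre, [] => [pre]
  | pre, c :: rest => if c = '\n' then pre :: pvSplitNl [] rest else pvSplitNl (pre ++ [c]) rest

-- structural model of A's brace scan over the character list, tracking the absolute position
def pvCharScan : List Char → Option Char → Int → Nat → Option Nat
  | [], _, _, _ => none
  | ch :: rest, quote, depth, pos =>
    let quote' :=
      if ch = '\'' ∨ ch = '"' then
        if quote = some ch then none else if quote = none then some ch else quote
      else quote
    if quote' = none then
      if ch = '{' then pvCharScan rest quote' (depth + 1) (pos + 1)
      else if ch = '}' then
        if depth - 1 = 0 then some pos else pvCharScan rest quote' (depth - 1) (pos + 1)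
      else pvCharScan rest quote' depth (pos + 1)
    else pvCharScan rest quote' depth (pos + 1)

-- budget-filtering model of the removal phase
def pvFilt : (String → Int) → List String → List String
  | _, [] => []
  | β, c :: cs =>
    if β c > 0 then pvFilt (fun x => if x = c then β c - 1 else β x) cs else c :: pvFilt β cs

-- ===== split("\n") characterisation =====

theorem pv_go_eq : ∀ (fuel : Nat) (l cur : List Char) (acc : List (List Char)),
    l.length < fuel →
    PySem.Chars.splitOn.go ['\n'] fuel l cur acc = acc.reverse ++ pvSplitNl cur.reverse l := by
  intro fuel
  induction fuel with
  | zero => intro l cur acc h; omega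
  | succ fuel ih =>
    intro l cur acc h
    cases l with
    | nil => simp [PySem.Chars.splitOn.go, pvSplitNl]
    | cons c rest =>
      rw [PySem.Chars.splitOn.go]
      by_cases hc : c = '\n'
      · subst hc
        simp only [List.isPrefixOf, BEq.rfl, Bool.true_and, if_true]
        have hd : List.drop ['\n'].length ('\n' :: rest) = rest := rfl
        rw [hd, ih rest [] (cur.reverse :: acc) (by simpa using Nat.lt_of_succ_lt_succ h)]
        simp [pvSplitNl]
      · have : (['\n'].isPrefixOf (c :: rest)) = false := by
          simp [List.isPrefixOf]; exact fun hx => (hc hx.symm).elim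
        rw [this]
        simp only [Bool.false_eq_true, if_false]
        rw [ih rest (c :: cur) acc (by simpa using Nat.lt_of_succ_lt_succ h)]
        simp [pvSplitNl, hc]

theorem pv_splitOn_eq (s : List Char) : PySem.Chars.splitOn s ['\n'] = pvSplitNl [] s := by
  have := pv_go_eq (s.length + 1) s [] [] (by omega)
  simpa [PySem.Chars.splitOn] using this

theorem pv_strSplit (s : String) : (pyStrSplitNl s).map String.toList = pvSplitNl [] s.toList := by
  have h := PySem.Str.split?_map s "\n"
  have hsep : ("\n" : String).toList = ['\n'] := rfl
  rw [hsep] at h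
  have h2 : PySem.Chars.split? s.toList ['\n'] = some (pvSplitNl [] s.toList) := by
    simp [PySem.Chars.split?, pv_splitOn_eq]
  rw [h2] at h
  cases hs : PySem.Str.split? s "\n" with
  | none => rw [hs] at h; simp at h
  | some xs =>
    rw [hs] at h
    simp only [Option.map_some, Option.some.injEq] at h
    simpa [pyStrSplitNl, hs] using h

theorem pv_noNl : ∀ (l pre piece : List Char), ('\n' : Char) ∉ pre →
    piece ∈ pvSplitNl pre l → ('\n' : Char) ∉ piece := by
  intro l
  induction l with
  | nil =>
    intro pre piece hpre hmem
    simp [pvSplitNl] at hmem; subst hmem; exact hpre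
  | cons c rest ih =>
    intro pre piece hpre hmem
    by_cases hc : c = '\n'
    · subst hc
      simp only [pvSplitNl, if_pos] at hmem
      rw [List.mem_cons] at hmem
      rcases hmem with hh | hh
      · subst hh; exact hpre
      · exact ih [] piece (by simp) hh
    · simp only [pvSplitNl, if_neg hc] at hmem
      refine ih (pre ++ [c]) piece ?_ hmem
      simp only [List.mem_append, List.mem_singleton, not_or]
      exact ⟨hpre, fun hh => hc hh.symm⟩

theorem pv_splitNl_noSep : ∀ (l pre : List Char), ('\n' : Char) ∉ l → pvSplitNl pre l = [pre ++ l] := by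
  intro l
  induction l with
  | nil => intro pre _; simp [pvSplitNl]
  | cons c rest ih =>
    intro pre h
    simp only [List.mem_cons, not_or] at h
    have hc : ¬ (c = '\n') := fun hc => h.1 hc.symm
    simp only [pvSplitNl, if_neg hc]
    rw [ih _ h.2]; simp

theorem pv_splitNl_append : ∀ (xs pre ys : List Char), ('\n' : Char) ∉ xs →
    pvSplitNl pre (xs ++ '\n' :: ys) = (pre ++ xs) :: pvSplitNl [] ys := by
  intro xs
  induction xs with
  | nil => intro pre ys _; simp [pvSplitNl]
  | cons c rest ih =>
    intro pre ys h
    simp only [List.mem_cons, not_or] at h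
    have hc : ¬ (c = '\n') := fun hc => h.1 hc.symm
    simp only [List.cons_append, pvSplitNl, if_neg hc]
    rw [ih _ ys h.2]; simp

-- ===== def-line search =====

theorem pv_findDef (fn : String) : ∀ (ls : List String) (k : Nat),
    pvA_findDefLine fn ls k = (ls.findIdx? (pvB_isDefLine (fn ++ "("))).map (· + k) := by
  intro ls
  induction ls with
  | nil => intro k; simp [pvA_findDefLine]
  | cons l rest ih =>
    intro k
    simp only [pvA_findDefLine, pvB_isDefLine, List.findIdx?_cons]
    by_cases hcom : (PySem.Str.startswith (PySem.Str.strip l) "//" ||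
        (PySem.Str.isIn "/*" (PySem.Str.strip l) && PySem.Str.isIn "*/" (PySem.Str.strip l))) = true
    · simp only [hcom, if_true, Bool.false_eq_true, if_false, ih (k + 1), Option.map_map]
      congr 1; funext i; simp only [Function.comp_apply]; omega
    · rw [Bool.not_eq_true] at hcom
      simp only [hcom, Bool.false_eq_true, if_false]
      by_cases hm : (PySem.Str.isIn (fn ++ "(") (PySem.Str.strip l) && !PySem.Str.isIn ";" (PySem.Str.strip l)) = true
      · simp only [hm, if_true]; simp
      · rw [Bool.not_eq_true] at hm
        simp only [hm, Bool.false_eq_true, if_false, ih (k + 1), Option.map_map]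
        congr 1; funext i; simp only [Function.comp_apply]; omega

-- ===== brace scan =====

theorem pv_scanLine_inr : ∀ (xs : List Char) (q : Option Char) (d : Int) (p0 p : Nat),
    pvB_scanLine xs q d p0 = Sum.inr p → p0 ≤ p ∧ p - p0 < xs.length := by
  intro xs
  induction xs with
  | nil => intro q d p0 p h; simp [pvB_scanLine] at h
  | cons ch rest ih =>
    intro q d p0 p h
    simp only [pvB_scanLine] at h
    split_ifs at h with h1 h2 h3 h4 <;>
      first
        | (cases h; refine ⟨le_refl _, ?_⟩; simp)
        | (rcases ih _ _ _ _ h with ⟨a, b⟩; refine ⟨by omega, by simp; omega⟩)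

theorem pv_step_match (ys rest : List Char) (q' : Option Char) (d' : Int) (pos p0 : Nat) :
    (match pvB_scanLine rest q' d' (p0 + 1) with
     | Sum.inr p => some ((pos + 1) + (p - (p0 + 1)))
     | Sum.inl (q'', d'') => pvCharScan ys q'' d'' ((pos + 1) + rest.length)) =
    (match pvB_scanLine rest q' d' (p0 + 1) with
     | Sum.inr p => some (pos + (p - p0))
     | Sum.inl (q'', d'') => pvCharScan ys q'' d'' (pos + (rest.length + 1))) := by
  cases hr : pvB_scanLine rest q' d' (p0 + 1) with
  | inl st => obtain ⟨a, b⟩ := st; simp only []; congr 1; omega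
  | inr p =>
    have hb := pv_scanLine_inr rest q' d' (p0 + 1) p hr
    simp only []; congr 1; omega

theorem pv_scan_append : ∀ (xs ys : List Char) (q : Option Char) (d : Int) (pos p0 : Nat),
    pvCharScan (xs ++ ys) q d pos =
      (match pvB_scanLine xs q d p0 with
       | Sum.inr p => some (pos + (p - p0))
       | Sum.inl (q', d') => pvCharScan ys q' d' (pos + xs.length)) := by
  intro xs
  induction xs with
  | nil =>
    intro ys q d pos p0
    simp [pvB_scanLine, pvCharScan]
  | cons ch rest ih =>
    intro ys q d pos p0
    simp only [List.cons_append, pvCharScan, pvB_scanLine]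
    split_ifs with h1 h2 h3 h4 <;>
      first
        | (rw [ih ys _ _ (pos + 1) (p0 + 1)]; apply pv_step_match)
        | (simp; done)

theorem pv_scan_shift : ∀ (xs : List Char) (q : Option Char) (d : Int) (pos : Nat),
    pvCharScan xs q d pos = (pvCharScan xs q d 0).map (· + pos) := by
  intro xs
  induction xs with
  | nil => intro q d pos; simp [pvCharScan]
  | cons ch rest ih =>
    intro q d pos
    simp only [pvCharScan]
    split_ifs <;>
      first
        | (simp; done)
        | (rw [ih _ _ (pos + 1), ih _ _ (0 + 1)]
           cases r : pvCharScan rest _ _ 0 <;> simp <;> omega)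

theorem pv_scan_lt : ∀ (xs : List Char) (q : Option Char) (d : Int) (pos e : Nat),
    pvCharScan xs q d pos = some e → pos ≤ e ∧ e < pos + xs.length := by
  intro xs
  induction xs with
  | nil => intro q d pos e h; simp [pvCharScan] at h
  | cons ch rest ih =>
    intro q d pos e h
    simp only [pvCharScan] at h
    split_ifs at h <;>
      first
        | (cases h; exact ⟨le_refl _, by simp only [List.length_cons]; omega⟩)
        | (rcases ih _ _ _ _ h with ⟨a, b⟩
           exact ⟨by omega, by simp only [List.length_cons]; omega⟩)

theorem pv_brace_eq (s : String) : ∀ (n i : Nat) (b : Int) (q : Option Char),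
    n = s.toList.length - i →
    pvA_braceScan s s.toList.length i b q = pvCharScan (s.toList.drop i) q b i := by
  intro n
  induction n with
  | zero =>
    intro i b q hn
    by_cases h : i < s.toList.length
    · omega
    · rw [pvA_braceScan, dif_neg h, List.drop_eq_nil_of_le (by omega)]
      simp [pvCharScan]
  | succ n ih =>
    intro i b q hn
    by_cases h : i < s.toList.length
    · rw [pvA_braceScan, dif_pos h]
      simp only [PySem.Str.pyGet?_natCast, List.getElem?_eq_getElem h]
      conv_rhs => rw [← List.getElem_cons_drop (as := s.toList) (i := i) h]
      simp only [pvCharScan]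
      split_ifs <;>
        first
          | rfl
          | (apply ih _ _ _ (by omega))
    · rw [pvA_braceScan, dif_neg h, List.drop_eq_nil_of_le (by omega)]
      simp [pvCharScan]

theorem pv_backtrack_zero (s : String) : ∀ (i : Nat),
    (∀ idx, idx < i → s.toList[idx]? ≠ some '\n') → pvA_backtrack s i = 0 := by
  intro i
  induction i with
  | zero => intro _; rfl
  | succ i ih =>
    intro h
    rw [pvA_backtrack]
    rw [if_pos]
    · exact ih (fun idx hidx => h idx (by omega))
    · simp only [PySem.Str.pyGet?_natCast]
      exact h i (by omega)

theorem pv_scan_nl : ∀ (J : List Char) (q : Option Char) (d : Int) (m : Nat),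
    pvCharScan ('\n' :: J) q d m = pvCharScan J q d (m + 1) := by
  intro J q d m
  simp only [pvCharScan]
  have h1 : ¬ (('\n' : Char) = '\'' ∨ ('\n' : Char) = '"') := by decide
  rw [if_neg h1]
  by_cases hq : q = none
  · subst hq
    rw [if_pos rfl, if_neg (by decide), if_neg (by decide)]
  · rw [if_neg hq]

-- a String whose characters are a take of a line, as produced by B's slice
theorem pv_slice_take (l : String) (p : Nat) :
    PySem.Str.slice l none (some ((p : Int) + 1)) = String.ofList (l.toList.take (p + 1)) := by
  apply String.ext
  rw [String.toList_ofList, PySem.Str.toList_slice, PySem.Chars.slice_eq_listSlice]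
  have : ((p : Int) + 1) = ((p + 1 : Nat) : Int) := by push_cast; ring
  rw [this, PySem.List.slice_to _ (by positivity)]
  simp

theorem pv_take_no_nl (cs : List Char) (n : Nat) (h : ('\n' : Char) ∉ cs) :
    ('\n' : Char) ∉ cs.take n := fun hm => h (List.mem_of_mem_take hm)

theorem pv_scan_single (xs : List Char) (q : Option Char) (d : Int) (pos p0 : Nat) :
    pvCharScan xs q d pos =
      (match pvB_scanLine xs q d p0 with
       | Sum.inr p => some (pos + (p - p0))
       | Sum.inl _ => none) := by
  have h := pv_scan_append xs [] q d pos p0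
  rw [List.append_nil] at h
  rw [h]
  cases hr : pvB_scanLine xs q d p0 with
  | inl st => obtain ⟨a, b⟩ := st; simp [pvCharScan]
  | inr p => simp

-- the per-line scan of B against the flat scan of A over the joined tail
theorem pv_scanLines_eq : ∀ (ls : List String) (q : Option Char) (d : Int) (acc : List String),
    (∀ l ∈ ls, ('\n' : Char) ∉ l.toList) →
    pvB_scanLines ls q d acc =
      (pvCharScan (PySem.Chars.join ['\n'] (ls.map String.toList)) q d 0).map
        (fun e => acc ++ (pvSplitNl []
          (List.take (e + 1) (PySem.Chars.join ['\n'] (ls.map String.toList)))).map String.ofList) := by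
  intro ls
  induction ls with
  | nil =>
    intro q d acc _
    simp [pvB_scanLines, PySem.Chars.join_nil, pvCharScan]
  | cons l rest ih =>
    intro q d acc h
    have hnl : ('\n' : Char) ∉ l.toList := h l (List.mem_cons_self)
    cases rest with
    | nil =>
      simp only [pvB_scanLines, List.map_cons, List.map_nil, PySem.Chars.join_singleton]
      rw [pv_scan_single l.toList q d 0 0]
      cases hr : pvB_scanLine l.toList q d 0 with
      | inl st =>
        obtain ⟨q', d'⟩ := st
        simp only [hr]
        simp [pvB_scanLines, pvCharScan]
      | inr p =>
        have hb := pv_scanLine_inr l.toList q d 0 p hr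
        simp only [hr, Option.map_some, Option.some.injEq]
        rw [pv_splitNl_noSep _ _ (pv_take_no_nl _ _ hnl)]
        simp only [List.nil_append, List.map_cons, List.map_nil]
        rw [pv_slice_take]
        simp
    | cons r t =>
      have hJ : PySem.Chars.join ['\n'] ((l :: r :: t).map String.toList)
          = l.toList ++ '\n' :: PySem.Chars.join ['\n'] ((r :: t).map String.toList) := by
        simp only [List.map_cons, PySem.Chars.join_cons_cons]
        simp [List.append_assoc]
      rw [hJ]
      conv_lhs => rw [pvB_scanLines]
      rw [pv_scan_append l.toList _ q d 0 0]
      cases hr : pvB_scanLine l.toList q d 0 with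
      | inr p =>
        have hb := pv_scanLine_inr l.toList q d 0 p hr
        simp only [hr, Option.map_some, Option.some.injEq]
        rw [List.take_append_of_le_length (by omega),
          pv_splitNl_noSep _ _ (pv_take_no_nl _ _ hnl)]
        simp only [List.nil_append, List.map_cons, List.map_nil]
        rw [pv_slice_take]
        simp
      | inl st =>
        obtain ⟨q', d'⟩ := st
        simp only [hr]
        rw [pv_scan_nl, pv_scan_shift,
          ih q' d' (acc ++ [l]) (fun x hx => h x (List.mem_cons_of_mem _ hx)),
          Option.map_map]
        cases he : pvCharScan (PySem.Chars.join ['\n'] ((r :: t).map String.toList)) q' d' 0 with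
        | none => simp
        | some e' =>
          simp only [Option.map_some, Option.some.injEq, Function.comp_apply]
          have hlen : l.toList.length ≤ e' + (0 + l.toList.length + 1) + 1 := by omega
          have h2 : e' + (0 + l.toList.length + 1) + 1 - l.toList.length = e' + 1 + 1 := by omega
          conv_rhs => rw [List.take_append, List.take_of_length_le hlen, h2,
            List.take_succ_cons]
          rw [pv_splitNl_append _ _ _ hnl]
          simp [List.append_assoc]

-- ===== extraction: A against B =====

set_option maxHeartbeats 1000000 in
theorem pv_extract_eq (codes : List String) (fn : String) :
    (match extract_function (PySem.Str.join "\n" codes ++ "\n```") fn with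
     | none => pvB_extract codes fn = none
     | some fc => fc ≠ "" ∧ pvB_extract codes fn = some (pyStrSplitNl fc)) := by
  cases hk : (pyStrSplitNl (PySem.Str.join "\n" codes ++ "\n```")).findIdx?
      (pvB_isDefLine (fn ++ "(")) with
  | none =>
    have hA : extract_function (PySem.Str.join "\n" codes ++ "\n```") fn = none := by
      simp only [extract_function]
      rw [pv_findDef fn _ 0, hk]
      rfl
    have hB : pvB_extract codes fn = none := by
      simp only [pvB_extract]
      rw [hk]
    rw [hA]
    exact hB
  | some k =>
    set lines := pyStrSplitNl (PySem.Str.join "\n" codes ++ "\n```") with hlines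
    set C := PySem.Chars.join ['\n'] ((lines.drop k).map String.toList) with hCdef
    obtain ⟨hklen, hfi⟩ := List.findIdx?_eq_some_iff_findIdx_eq.mp hk
    have hpred : pvB_isDefLine (fn ++ "(") lines[k] = true := by
      have := List.findIdx_getElem (p := pvB_isDefLine (fn ++ "(")) (xs := lines)
        (w := by rw [hfi]; exact hklen)
      simpa [hfi] using this
    have hfree : ∀ l ∈ lines, ('\n' : Char) ∉ l.toList := by
      intro l hl
      have hmap : l.toList ∈ lines.map String.toList := List.mem_map_of_mem hl
      rw [hlines, pv_strSplit] at hmap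
      exact pv_noNl _ [] l.toList (by simp) hmap
    have hchars : (PySem.Str.join "\n" (lines.drop k)).toList = C := by
      rw [PySem.Str.toList_join]; rfl
    have htail : lines.drop k = lines[k] :: lines.drop (k + 1) :=
      (List.getElem_cons_drop hklen).symm
    -- the matched line contains fn ++ "("
    have hIn : PySem.Str.isIn (fn ++ "(") (PySem.Str.strip lines[k]) = true := by
      simp [pvB_isDefLine] at hpred
      simp [String.toList_append]
      exact hpred.2.1
    have hstripinf : PySem.Chars.strip lines[k].toList <:+: lines[k].toList := by
      unfold PySem.Chars.strip PySem.Chars.rstrip PySem.Chars.lstrip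
      have h1 : List.dropWhile PySem.Chars.isspace lines[k].toList <:+ lines[k].toList :=
        List.dropWhile_suffix _
      have h2 : (List.dropWhile PySem.Chars.isspace
            (List.dropWhile PySem.Chars.isspace lines[k].toList).reverse).reverse
          <+: List.dropWhile PySem.Chars.isspace lines[k].toList := by
        have h3 := List.dropWhile_suffix (l := (List.dropWhile PySem.Chars.isspace lines[k].toList).reverse)
          PySem.Chars.isspace
        obtain ⟨w, hw⟩ := h3
        exact ⟨w.reverse, by rw [← List.reverse_append, hw, List.reverse_reverse]⟩
      exact h2.isInfix.trans h1.isInfix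
    have hinfix : (fn ++ "(").toList <:+: lines[k].toList := by
      have h0 : (fn ++ "(").toList <:+: (PySem.Str.strip lines[k]).toList :=
        (PySem.Str.isIn_iff_infix _ _).mp hIn
      rw [PySem.Str.toList_strip] at h0
      exact h0.trans hstripinf
    obtain ⟨u, v, huv⟩ := hinfix
    have htne : (fn ++ "(").toList ≠ [] := by simp [String.toList_append]
    have hulen : u.length + (fn ++ "(").toList.length + v.length = lines[k].toList.length := by
      have hlen := congrArg List.length huv
      simp only [List.length_append] at hlen
      omega
    obtain ⟨r, hCr⟩ : ∃ r, C = lines[k].toList ++ r := by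
      rw [hCdef, htail]
      cases lines.drop (k + 1) with
      | nil => exact ⟨[], by simp [PySem.Chars.join_singleton]⟩
      | cons a b =>
        refine ⟨'\n' :: PySem.Chars.join ['\n'] ((a :: b).map String.toList), ?_⟩
        simp [PySem.Chars.join_cons_cons]
    have hfind0 : 0 ≤ PySem.Chars.find C (fn ++ "(").toList :=
      (PySem.Chars.find_nonneg_iff _ _).mpr
        ⟨u, v ++ r, by rw [hCr, ← huv]; simp [List.append_assoc]⟩
    have hocc : (fn ++ "(").toList <+: C.drop u.length := by
      rw [hCr, ← huv, List.append_assoc, List.append_assoc, List.drop_left]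
      exact ⟨v ++ r, by simp⟩
    have hspec := PySem.Chars.find_spec (s := C) (sub := (fn ++ "(").toList) hfind0
    have hjle : (PySem.Chars.find C (fn ++ "(").toList).toNat ≤ u.length := by
      by_contra hgt
      exact (hspec.2 u.length (by omega)) hocc
    have hult : u.length < lines[k].toList.length := by
      have htlen : 0 < (fn ++ "(").toList.length := List.length_pos_of_ne_nil htne
      omega
    have hback : pvA_backtrack (PySem.Str.join "\n" (lines.drop k))
        (PySem.Chars.find C (fn ++ "(").toList).toNat = 0 := by
      apply pv_backtrack_zero
      intro idx hidx
      have hidx2 : idx < lines[k].toList.length := by omega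
      rw [hchars]
      rw [hCr]
      rw [List.getElem?_append_left hidx2]
      rw [List.getElem?_eq_getElem hidx2]
      intro heq
      have hnl : lines[k].toList[idx] = '\n' := by simpa using heq
      exact hfree lines[k] (List.getElem_mem hklen) (hnl ▸ List.getElem_mem hidx2)
    have hfindStr : PySem.Str.find (PySem.Str.join "\n" (lines.drop k)) (fn ++ "(")
        = PySem.Chars.find C (fn ++ "(").toList := by
      rw [PySem.Str.find_eq, hchars]
    have hA : extract_function (PySem.Str.join "\n" codes ++ "\n```") fn =
        (match pvCharScan C none 0 0 with
         | none => none
         | some e => some (PySem.Str.slice (PySem.Str.join "\n" (lines.drop k))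
             (some ((0 : Nat) : Int)) (some ((e : Int) + 1)))) := by
      simp only [extract_function]
      rw [← hlines, pv_findDef fn lines 0, hk]
      simp only [Option.map_some, Nat.add_zero]
      rw [PySem.List.slice_from_natCast lines k, hfindStr, if_neg (by omega), hback]
      have hlenN : (PySem.Str.len (PySem.Str.join "\n" (lines.drop k))).toNat
          = (PySem.Str.join "\n" (lines.drop k)).toList.length := by
        rw [PySem.Str.len_eq]; exact Int.toNat_natCast _
      rw [hlenN, pv_brace_eq _ _ 0 0 none rfl, List.drop_zero, hchars]
    have hB : pvB_extract codes fn = (pvCharScan C none 0 0).map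
        (fun e => (pvSplitNl [] (C.take (e + 1))).map String.ofList) := by
      simp only [pvB_extract]
      rw [← hlines, hk]
      change pvB_scanLines (lines.drop k) none 0 [] = _
      rw [pv_scanLines_eq (lines.drop k) none 0 []
        (fun l hl => hfree l (List.mem_of_mem_drop hl))]
      simp [hCdef]
    rw [hA, hB]
    cases hscan : pvCharScan C none 0 0 with
    | none => rfl
    | some e =>
      have he2 := pv_scan_lt C none 0 0 e hscan
      have hfc : (PySem.Str.slice (PySem.Str.join "\n" (lines.drop k))
          (some ((0 : Nat) : Int)) (some ((e : Int) + 1))).toList = C.take (e + 1) := by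
        rw [PySem.Str.toList_slice, PySem.Chars.slice_eq_listSlice, hchars]
        have hcast : ((e : Int) + 1) = ((e + 1 : Nat) : Int) := by push_cast; ring
        rw [hcast, PySem.List.slice_natCast]
        simp
      constructor
      · intro h0
        rw [h0] at hfc
        have hnil : C.take (e + 1) = [] := hfc.symm
        rcases List.take_eq_nil_iff.mp hnil with h | h
        · omega
        · rw [h] at he2; simp at he2
      · have hmap : (pyStrSplitNl (PySem.Str.slice (PySem.Str.join "\n" (lines.drop k))
              (some ((0 : Nat) : Int)) (some ((e : Int) + 1)))).map String.toList
            = ((pvSplitNl [] (C.take (e + 1))).map String.ofList).map String.toList := by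
          rw [pv_strSplit, hfc]
          simp [List.map_map, Function.comp_def, String.toList_ofList]
        have hinj : Function.Injective (List.map String.toList) :=
          List.map_injective_iff.mpr (fun a b hab => String.toList_injective hab)
        rw [hinj hmap]
        rfl

-- ===== removal phase =====

theorem pv_remove_getD {cs : List String} {l : String} :
    (PySem.List.remove? cs l).getD cs = cs.erase l := by
  unfold PySem.List.remove?
  rw [List.erase_eq_eraseIdx]
  cases h : List.idxOf? l cs <;> simp

theorem pv_filt_congr : ∀ (cs : List String) (β β' : String → Int),
    (∀ c ∈ cs, β c = β' c) → pvFilt β cs = pvFilt β' cs := by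
  intro cs
  induction cs with
  | nil => intro β β' _; rfl
  | cons c rest ih =>
    intro β β' h
    have hc : β c = β' c := h c (List.mem_cons_self)
    simp only [pvFilt, hc]
    by_cases hp : β' c > 0
    · rw [if_pos hp, if_pos hp]
      exact ih _ _ (fun x hx => by
        by_cases hxc : x = c <;> simp [hxc, hc, h x (List.mem_cons_of_mem _ hx)])
    · rw [if_neg hp, if_neg hp, ih _ _ (fun x hx => h x (List.mem_cons_of_mem _ hx))]

theorem pv_filt_zero : ∀ (cs : List String) (β : String → Int),
    (∀ c ∈ cs, β c ≤ 0) → pvFilt β cs = cs := by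
  intro cs
  induction cs with
  | nil => intro β _; rfl
  | cons c rest ih =>
    intro β h
    have hc : ¬ β c > 0 := by have := h c (List.mem_cons_self); omega
    simp only [pvFilt, if_neg hc]
    rw [ih _ (fun x hx => h x (List.mem_cons_of_mem _ hx))]

theorem pv_filt_erase : ∀ (cs : List String) (β : String → Int) (l : String),
    0 ≤ β l → l ∈ cs →
    pvFilt β (cs.erase l) = pvFilt (fun x => if x = l then β l + 1 else β x) cs := by
  intro cs
  induction cs with
  | nil => intro β l _ h; simp at h
  | cons c rest ih =>
    intro β l hβ hmem
    by_cases hc : c = l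
    · subst hc
      rw [List.erase_cons_head]
      conv_rhs => rw [pvFilt]
      rw [if_pos (by simp; omega)]
      refine pv_filt_congr rest _ _ (fun x _ => ?_)
      by_cases hxc : x = c
      · subst hxc; simp
      · simp [hxc]
    · have hl : l ∈ rest := by
        rcases List.mem_cons.mp hmem with h1 | h1
        · exact absurd h1.symm hc
        · exact h1
      rw [List.erase_cons_tail (by simp; exact hc)]
      simp only [pvFilt]
      have hcc : (if c = l then β l + 1 else β c) = β c := by rw [if_neg hc]
      rw [hcc]
      by_cases hp : β c > 0
      · rw [if_pos hp, if_pos hp]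
        rw [ih _ l (by simp [show ¬ (l = c) from fun hh => hc hh.symm]; omega) hl]
        refine pv_filt_congr rest _ _ (fun x _ => ?_)
        have hlc : ¬ l = c := fun hh => hc hh.symm
        by_cases hxl : x = l <;> by_cases hxc : x = c <;>
          simp only [hxl, hxc, if_pos, if_neg, hc, hlc] <;>
          simp [hc, hlc, hxl, hxc] <;> omega
      · rw [if_neg hp, if_neg hp, ih _ l hβ hl]

theorem pv_rem_eq : ∀ (fls cs : List String),
    fls.foldl (fun cs func_code =>
      if func_code = "" ∨ func_code ∉ cs then cs
      else (PySem.List.remove? cs func_code).getD cs) cs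
    = pvFilt (fun l => if l = "" then 0 else (fls.count l : Int)) cs := by
  intro fls
  induction fls with
  | nil =>
    intro cs
    simp only [List.foldl_nil]
    exact (pv_filt_zero cs _ (fun c _ => by by_cases h : c = "" <;> simp [h])).symm
  | cons l F ih =>
    intro cs
    rw [List.foldl_cons]
    by_cases hle : l = ""
    · subst hle
      rw [if_pos (Or.inl rfl), ih cs]
      refine pv_filt_congr cs _ _ (fun c _ => ?_)
      by_cases hce : c = "" <;> simp [hce, List.count_cons]
    · by_cases hmem : l ∈ cs
      · rw [if_neg (by simp [hle, hmem]), pv_remove_getD, ih (cs.erase l),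
          pv_filt_erase cs _ l (by simp [hle]) hmem]
        refine pv_filt_congr cs _ _ (fun c _ => ?_)
        by_cases hcl : c = l
        · subst hcl; simp [hle, List.count_cons]
        · have hlc : ¬ l = c := fun hh => hcl hh.symm
          by_cases hce : c = "" <;> simp [hce, hcl, hlc, List.count_cons, hle]
      · rw [if_pos (Or.inr hmem), ih cs]
        refine pv_filt_congr cs _ _ (fun c hc => ?_)
        have hcl : ¬ c = l := fun hh => hmem (hh ▸ hc)
        have hlc : ¬ l = c := fun hh => hcl hh.symm
        by_cases hce : c = "" <;> simp [hce, hcl, hlc, List.count_cons]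

theorem pv_budget_getD (fls : List String) (v : String) :
    (fls.foldl (fun d line => if line = "" then d else d.insert line (d.getD line 0 + 1))
      (PySem.Dict.empty : PySem.Dict String Int)).getD v 0
    = if v = "" then 0 else (fls.count v : Int) := by
  have hstep : (fun (d : PySem.Dict String Int) line =>
      if line = "" then d else d.insert line (d.getD line 0 + 1))
    = (fun (d : PySem.Dict String Int) line =>
      if ¬ (line = "") then d.insert line (d.getD line 0 + 1) else d) := by
    funext d line
    exact (ite_not _ _ _).symm
  rw [hstep, PySem.List.foldl_ite_eq_foldl_filter _ _ fls _,
    PySem.Dict.getD_foldl_insert_add_one, PySem.Dict.getD_empty]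
  by_cases hv : v = ""
  · subst hv
    have : List.count "" (fls.filter (fun x => decide (¬ x = ""))) = 0 := by
      rw [List.count_eq_zero]
      intro hmem
      have := List.of_mem_filter hmem
      simp at this
    rw [this]
    simp
  · rw [List.count_filter (by simp [hv])]
    simp [hv]

theorem pv_bfold : ∀ (cs ks : List String) (d : PySem.Dict String Int),
    (cs.foldl (fun (acc : List String × PySem.Dict String Int) c =>
        if acc.2.getD c 0 > 0 then (acc.1, acc.2.insert c (acc.2.getD c 0 - 1))
        else (acc.1 ++ [c], acc.2)) (ks, d)).1
    = ks ++ pvFilt (fun x => d.getD x 0) cs := by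
  intro cs
  induction cs with
  | nil => intro ks d; simp [pvFilt]
  | cons c rest ih =>
    intro ks d
    rw [List.foldl_cons]
    by_cases hp : d.getD c 0 > 0
    · rw [if_pos hp]
      rw [ih ks (d.insert c (d.getD c 0 - 1))]
      conv_rhs => rw [pvFilt]
      rw [if_pos hp]
      congr 1
      refine pv_filt_congr rest _ _ (fun x _ => ?_)
      rw [PySem.Dict.getD_insert]
    · rw [if_neg hp, ih (ks ++ [c]) d]
      conv_rhs => rw [pvFilt]
      rw [if_neg hp]
      simp

theorem split_var_equal : ∀ (codes : List String) (func_name : String),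
    split_var codes func_name = split_var_alt codes func_name := by
  intro codes fn
  have hx := pv_extract_eq codes fn
  simp only [split_var, split_var_alt]
  cases hE : extract_function (PySem.Str.join "\n" codes ++ "\n```") fn with
  | none =>
    rw [hE] at hx
    rw [hx]
  | some fc =>
    rw [hE] at hx
    rw [hx.2]
    show (if fc = "" then [codes, []] else _) = _
    rw [if_neg hx.1]
    show [_, pyStrSplitNl fc] = [_, pyStrSplitNl fc]
    congr 1
    rw [pv_rem_eq, pv_bfold codes [] _, List.nil_append]
    refine pv_filt_congr codes _ _ (fun c _ => ?_)
    rw [pv_budget_getD]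

-- ===== VERDICT (by name: the statement is the Claim_ definition above) =====
theorem split_var_spec : Claim_equal_split_var := by
  intro codes func_name _
  show _ = _
  exact split_var_equal codes func_name
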